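-- pv_equiv track=rewrite | github.com/colemai/bioinformatics_scripts | university/p3/parse_rfam.py | record_finder
-- ===== SOURCE A (Python) =====
-- def record_finder(lines):
--     """Yield lines from a single record of file (Rfam format)
--
--     lines: list of lines or open file object
--     """
--     curr = []
--     for line in lines:
--         if not line.strip():
--             continue
--         if line.startswith('//'):
--             yield curr
--             curr = []
--         else:
--             curr.append(line.strip())
--     if curr:
--         yield curr
-- ===== SOURCE B (Python) =====
-- def _records(kept):
--     """Records of an already blank-filtered line list: split at the first
--     '//' line, recurse on the remainder."""
--     for i, l in enumerate(kept):
--         if l.startswith('//'):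
--             return [[x.strip() for x in kept[:i]]] + _records(kept[i + 1:])
--     return [[x.strip() for x in kept]] if kept else []
--
--
-- def record_finder(lines):
--     """Yield lines from a single record of file (Rfam format)
--
--     lines: list of lines or open file object
--     """
--     yield from _records([l for l in lines if l.strip()])
-- ===== Notes on version B (the rewrite author's own statement) =====
-- stated objective: alternative
-- what changed: A builds records in one pass with a current-record accumulator; B first filters out blank lines and then recursively splits the list at the first '//' delimiter (find-split-recurse), with no accumulator state.
import Mathlib
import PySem

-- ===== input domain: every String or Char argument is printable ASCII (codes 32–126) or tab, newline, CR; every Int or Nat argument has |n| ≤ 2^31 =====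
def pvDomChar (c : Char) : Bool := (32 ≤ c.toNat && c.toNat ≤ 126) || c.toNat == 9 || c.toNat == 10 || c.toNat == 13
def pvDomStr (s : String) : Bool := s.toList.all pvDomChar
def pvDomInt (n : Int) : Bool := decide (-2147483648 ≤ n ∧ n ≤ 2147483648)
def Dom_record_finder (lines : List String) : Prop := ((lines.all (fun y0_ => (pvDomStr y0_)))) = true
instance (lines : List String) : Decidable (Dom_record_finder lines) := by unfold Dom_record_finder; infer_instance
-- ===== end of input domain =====

-- B regroups by first filtering out blank lines and recursively splitting at the first '//' line (alternative decomposition, same cost); A is a single accumulator pass.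
-- Both A (a generator) and B only read `lines`; equivalence is about the yielded sequence of records.
-- ===== PORT A =====
def record_finder (lines : List String) : List (List String) :=
  let st := lines.foldl (fun (st : List (List String) × List String) line =>
    if PySem.Str.strip line = "" then st
    else if PySem.Str.startswith line "//" then (st.1 ++ [st.2], [])
    else (st.1, st.2 ++ [PySem.Str.strip line])) ([], [])
  if st.2 ≠ [] then st.1 ++ [st.2] else st.1

-- ===== PORT B =====
-- split the blank-filtered list at the first '//' line and recurse on the rest
def pvRecords (kept : List String) : List (List String) :=
  let pre := kept.takeWhile (fun l => !PySem.Str.startswith l "//")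
  let post := kept.dropWhile (fun l => !PySem.Str.startswith l "//")
  if hpost : post = [] then (if kept = [] then [] else [pre.map PySem.Str.strip])
  else pre.map PySem.Str.strip :: pvRecords post.tail
termination_by kept.length
decreasing_by
  have hs : post.length ≤ kept.length := List.Sublist.length_le (List.dropWhile_sublist _)
  have h0 : post.length ≠ 0 := fun h0 => hpost (List.eq_nil_of_length_eq_zero h0)
  show post.tail.length < kept.length
  rw [List.length_tail]
  omega

def record_finder_alt (lines : List String) : List (List String) :=
  pvRecords (lines.filter (fun l => !(PySem.Str.strip l == "")))

-- ===== PRECONDITION & SPEC =====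
def Spec_record_finder (lines : List String) (out : List (List String)) : Prop := out = record_finder_alt lines
instance (lines : List String) (out : List (List String)) : Decidable (Spec_record_finder lines out) := by unfold Spec_record_finder; infer_instance

-- ===== CLAIM (what is proved, stated in full; the proofs are below) =====
def Claim_equal_record_finder : Prop := ∀ (lines : List String), Dom_record_finder lines → Spec_record_finder lines (record_finder lines)

-- ===== LEMMAS AND PROOFS =====


-- proof-side abbreviations
def pvStep (st : List (List String) × List String) (line : String) : List (List String) × List String :=
  if PySem.Str.strip line = "" then st
  else if PySem.Str.startswith line "//" then (st.1 ++ [st.2], [])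
  else (st.1, st.2 ++ [PySem.Str.strip line])

def pvFinish (st : List (List String) × List String) : List (List String) :=
  if st.2 ≠ [] then st.1 ++ [st.2] else st.1

def pvBody (curr : List String) : List String → List (List String)
  | [] => if curr ≠ [] then [curr] else []
  | l :: ls =>
    if PySem.Str.startswith l "//" then curr :: pvBody [] ls
    else pvBody (curr ++ [PySem.Str.strip l]) ls

def pvConsHead (x : String) : List (List String) → List (List String)
  | [] => [[x]]
  | r :: rs => (x :: r) :: rs

def pvAttach (curr : List String) : List (List String) → List (List String)
  | [] => if curr ≠ [] then [curr] else []
  | r :: rs => (curr ++ r) :: rs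

theorem foldl_filter_pvStep (lines : List String) (st : List (List String) × List String) :
    lines.foldl pvStep st = (lines.filter (fun l => !(PySem.Str.strip l == ""))).foldl pvStep st := by
  induction lines generalizing st with
  | nil => rfl
  | cons l ls ih =>
    by_cases h : PySem.Str.strip l = "" <;>
      simp [h, pvStep, ih]

theorem foldl_pvStep_eq_pvBody (kept : List String)
    (hk : ∀ l ∈ kept, PySem.Str.strip l ≠ "")
    (st : List (List String) × List String) :
    pvFinish (kept.foldl pvStep st) = st.1 ++ pvBody st.2 kept := by
  induction kept generalizing st with
  | nil => cases st with
    | mk out curr => by_cases h : curr = [] <;> simp [pvFinish, pvBody, h]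
  | cons l ls ih =>
    have hl : PySem.Str.strip l ≠ "" := hk l (by simp)
    have hk' : ∀ x ∈ ls, PySem.Str.strip x ≠ "" := fun x hx => hk x (by simp [hx])
    by_cases hd : PySem.Chars.startswith l.toList ['/', '/'] = true
    · simp [List.foldl_cons, pvStep, hl, hd, pvBody, ih hk']
    · simp [List.foldl_cons, pvStep, hl, hd, pvBody, ih hk']

theorem pvAttach_nil (xs : List (List String)) : pvAttach [] xs = xs := by
  cases xs <;> simp [pvAttach]

theorem pvRecords_nil : pvRecords [] = [] := by
  rw [pvRecords]; simp

theorem pvRecords_cons_delim (l : String) (ls : List String)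
    (h : PySem.Chars.startswith l.toList ['/', '/'] = true) :
    pvRecords (l :: ls) = [] :: pvRecords ls := by
  rw [pvRecords]
  simp [h]

theorem pvRecords_cons_nondelim (l : String) (ls : List String)
    (h : ¬ PySem.Chars.startswith l.toList ['/', '/'] = true) :
    pvRecords (l :: ls) = pvConsHead (PySem.Str.strip l) (pvRecords ls) := by
  rw [pvRecords]
  conv_rhs => rw [pvRecords]
  by_cases hdw : List.dropWhile (fun x => !PySem.Chars.startswith x.toList ['/', '/']) ls = []
  · cases ls with
    | nil => simp [h, pvConsHead]
    | cons a as => simp [h, hdw, pvConsHead]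
  · simp [h, hdw, pvConsHead]

theorem pvBody_eq_attach (kept : List String) (curr : List String) :
    pvBody curr kept = pvAttach curr (pvRecords kept) := by
  induction kept generalizing curr with
  | nil => simp [pvBody, pvRecords_nil, pvAttach]
  | cons l ls ih =>
    by_cases hd : PySem.Chars.startswith l.toList ['/', '/'] = true
    · have hd' : PySem.Str.startswith l "//" = true := hd
      rw [pvRecords_cons_delim l ls hd, pvBody, if_pos hd', ih, pvAttach_nil]
      simp [pvAttach]
    · rw [pvRecords_cons_nondelim l ls hd]
      rw [pvBody]
      simp only [ih]
      cases hr : pvRecords ls with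
      | nil => simp [hd, pvConsHead, pvAttach]
      | cons r rs => simp [hd, pvConsHead, pvAttach]

-- ===== VERDICT =====
theorem record_finder_spec : Claim_equal_record_finder := by
  intro lines _
  unfold Spec_record_finder record_finder record_finder_alt
  show pvFinish (lines.foldl pvStep ([], [])) = _
  rw [foldl_filter_pvStep]
  rw [foldl_pvStep_eq_pvBody _ (by intro l hl; simp [List.mem_filter] at hl; exact hl.2)]
  rw [pvBody_eq_attach, pvAttach_nil]
  simp
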